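-- pv_equiv track=rewrite | github.com/KimJonghoSNU/Abstraction_gap | src/run_round3_1.py | _apply_v5_rerank_to_candidates
-- ===== SOURCE A (Python) =====
-- from typing import Dict, List, Optional, Sequence, Tuple
--
-- def _apply_v5_rerank_to_candidates(
--     ranked_indices: Sequence[int],
--     candidate_paths: Sequence[Tuple[int, ...]],
--     path_to_doc_id: Dict[Tuple[int, ...], str],
--     topk: int,
-- ) -> Tuple[List[Tuple[int, ...]], List[str]]:
--     topk = max(1, int(topk))
--     selected_paths: List[Tuple[int, ...]] = []
--     selected_doc_ids: List[str] = []
--     seen_paths: set[Tuple[int, ...]] = set()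
--     for rank_idx in ranked_indices:
--         cand_pos = int(rank_idx) - 1
--         if cand_pos < 0 or cand_pos >= len(candidate_paths):
--             continue
--         path = tuple(candidate_paths[cand_pos])
--         if path in seen_paths:
--             continue
--         selected_paths.append(path)
--         selected_doc_ids.append(str(path_to_doc_id.get(path, "")).strip() or f"path:{path}")
--         seen_paths.add(path)
--         if len(selected_paths) >= topk:
--             break
--     # Intent: if LLM returns fewer than top-k indices, backfill by the original candidate order.
--     for path in candidate_paths:
--         path_t = tuple(path)
--         if path_t in seen_paths:
--             continue
--         doc_id = str(path_to_doc_id.get(path_t, "")).strip()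
--         selected_paths.append(path_t)
--         selected_doc_ids.append(doc_id or f"path:{path_t}")
--         seen_paths.add(path_t)
--         if len(selected_paths) >= topk:
--             break
--     return selected_paths[:topk], selected_doc_ids[:topk]
-- ===== SOURCE B (Python) =====
-- def _apply_v5_rerank_to_candidates(ranked_indices, candidate_paths, path_to_doc_id, topk):
--     topk = max(1, int(topk))
--     # Priority index: each distinct path tuple gets the position of its first
--     # appearance in the combined order (valid ranked picks first, then the
--     # original candidate order as backfill). setdefault keeps the earliest.
--     prio = {}
--     for i, rank_idx in enumerate(ranked_indices):
--         pos = int(rank_idx) - 1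
--         if 0 <= pos < len(candidate_paths):
--             prio.setdefault(tuple(candidate_paths[pos]), i)
--     n = len(ranked_indices)
--     for j, path in enumerate(candidate_paths):
--         prio.setdefault(tuple(path), n + j)
--     chosen = sorted(prio, key=prio.get)[:topk]
--     doc_ids = [str(path_to_doc_id.get(t, "")).strip() or f"path:{t}" for t in chosen]
--     return chosen, doc_ids
-- ===== Notes on version B (the rewrite author's own statement) =====
-- stated objective: alternative
-- what changed: B replaces A's two break-early selection loops with an explicit seen-set by a priority index: a dict built with setdefault maps each distinct path tuple to the position of its first appearance (valid ranked picks numbered 0..r-1, original-order backfill numbered r..r+n-1), then the distinct paths are sorted by that priority, the top-k prefix is taken, and doc ids are computed only for it.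
import Mathlib
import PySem

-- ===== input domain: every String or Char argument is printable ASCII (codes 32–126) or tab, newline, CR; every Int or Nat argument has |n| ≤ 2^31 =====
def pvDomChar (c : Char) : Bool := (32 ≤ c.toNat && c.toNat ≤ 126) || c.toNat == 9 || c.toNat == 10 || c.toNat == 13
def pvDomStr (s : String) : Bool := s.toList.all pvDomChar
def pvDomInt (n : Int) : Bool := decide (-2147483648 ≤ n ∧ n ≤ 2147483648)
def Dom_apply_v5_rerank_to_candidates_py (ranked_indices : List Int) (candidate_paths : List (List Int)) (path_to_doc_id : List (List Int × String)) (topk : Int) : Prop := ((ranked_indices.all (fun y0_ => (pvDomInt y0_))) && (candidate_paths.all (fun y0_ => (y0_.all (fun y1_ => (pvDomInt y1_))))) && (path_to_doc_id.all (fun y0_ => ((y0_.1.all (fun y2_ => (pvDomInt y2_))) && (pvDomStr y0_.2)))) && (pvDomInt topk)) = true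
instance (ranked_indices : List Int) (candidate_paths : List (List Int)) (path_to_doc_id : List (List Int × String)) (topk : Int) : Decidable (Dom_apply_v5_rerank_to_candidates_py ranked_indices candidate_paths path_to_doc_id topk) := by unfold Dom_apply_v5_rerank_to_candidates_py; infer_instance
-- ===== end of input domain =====

-- ===== PORT A =====
-- B replaces A's two break-early selection loops by a first-appearance priority index plus a sort (objective: alternative).
-- shared helper: Python's  str(path_to_doc_id.get(path, "")).strip() or f"path:{path}"  (identical expression in both programs)
def pvTupleRepr (p : List Int) : String :=
  match p with
  | [] => "()"
  | [x] => "(" ++ PySem.Int.toStr x ++ ",)"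
  | _ => "(" ++ String.intercalate ", " (p.map PySem.Int.toStr) ++ ")"

def pvDocId (d : List (List Int × String)) (p : List Int) : String :=
  let s := PySem.Str.strip (PySem.Dict.getD (PySem.Dict.mk d) p "")
  if s = "" then "path:" ++ pvTupleRepr p else s

-- A's first loop: over ranked_indices, with the bounds guard and the break at topk
def pvALoop1 (cps : List (List Int)) (d : List (List Int × String)) (k : Int) :
    List Int → List (List Int) × List String × PySem.Set (List Int) →
    List (List Int) × List String × PySem.Set (List Int)
  | [], s => s
  | r :: rest, (sel, ids, seen) =>
    let pos := r - 1
    if pos < 0 ∨ (cps.length : Int) ≤ pos then pvALoop1 cps d k rest (sel, ids, seen)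
    else
      let path := (PySem.List.pyGet? cps pos).getD []
      if PySem.Set.contains seen path then pvALoop1 cps d k rest (sel, ids, seen)
      else
        let sel' := sel ++ [path]
        let ids' := ids ++ [pvDocId d path]
        let seen' := PySem.Set.add seen path
        if (sel'.length : Int) ≥ k then (sel', ids', seen')
        else pvALoop1 cps d k rest (sel', ids', seen')

-- A's second loop: backfill over candidate_paths
def pvALoop2 (d : List (List Int × String)) (k : Int) :
    List (List Int) → List (List Int) × List String × PySem.Set (List Int) →
    List (List Int) × List String × PySem.Set (List Int)
  | [], s => s
  | p :: rest, (sel, ids, seen) =>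
    if PySem.Set.contains seen p then pvALoop2 d k rest (sel, ids, seen)
    else
      let doc_id := PySem.Str.strip (PySem.Dict.getD (PySem.Dict.mk d) p "")
      let sel' := sel ++ [p]
      let ids' := ids ++ [if doc_id = "" then "path:" ++ pvTupleRepr p else doc_id]
      let seen' := PySem.Set.add seen p
      if (sel'.length : Int) ≥ k then (sel', ids', seen')
      else pvALoop2 d k rest (sel', ids', seen')

def apply_v5_rerank_to_candidates_py (ranked_indices : List Int) (candidate_paths : List (List Int)) (path_to_doc_id : List (List Int × String)) (topk : Int) : List (List Int) × List String :=
  let k := max 1 topk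
  let s1 := pvALoop1 candidate_paths path_to_doc_id k ranked_indices ([], [], PySem.Set.empty)
  let s2 := pvALoop2 path_to_doc_id k candidate_paths s1
  (PySem.List.slice s2.1 none (some k), PySem.List.slice s2.2.1 none (some k))

-- ===== PORT B =====
def apply_v5_rerank_to_candidates_py_alt (ranked_indices : List Int) (candidate_paths : List (List Int)) (path_to_doc_id : List (List Int × String)) (topk : Int) : List (List Int) × List String :=
  let k := max 1 topk
  -- prio.setdefault(tuple(candidate_paths[pos]), i) over enumerate(ranked_indices)
  let prio1 := (PySem.List.enumerate ranked_indices).foldl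
      (fun dct p =>
        let pos := p.2 - 1
        if 0 ≤ pos ∧ pos < (candidate_paths.length : Int)
        then dct.setdefault ((PySem.List.pyGet? candidate_paths pos).getD []) p.1
        else dct) PySem.Dict.empty
  let n := PySem.List.len ranked_indices
  -- prio.setdefault(tuple(path), n + j) over enumerate(candidate_paths)
  let prio := (PySem.List.enumerate candidate_paths).foldl
      (fun dct p => dct.setdefault p.2 (n + p.1)) prio1
  -- sorted(prio, key=prio.get)[:topk]; every iterated key is in prio, so prio.get(t) is its stored priority
  let chosen := PySem.List.slice
      (PySem.List.sorted prio.keys (fun t => prio.getD t 0) false) none (some k)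
  (chosen, chosen.map (pvDocId path_to_doc_id))

-- ===== PRECONDITION & SPEC =====
def Spec_apply_v5_rerank_to_candidates_py (ranked_indices : List Int) (candidate_paths : List (List Int)) (path_to_doc_id : List (List Int × String)) (topk : Int) (out : List (List Int) × List String) : Prop := out = apply_v5_rerank_to_candidates_py_alt ranked_indices candidate_paths path_to_doc_id topk
instance (ranked_indices : List Int) (candidate_paths : List (List Int)) (path_to_doc_id : List (List Int × String)) (topk : Int) (out : List (List Int) × List String) : Decidable (Spec_apply_v5_rerank_to_candidates_py ranked_indices candidate_paths path_to_doc_id topk out) := by unfold Spec_apply_v5_rerank_to_candidates_py; infer_instance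

-- ===== CLAIM (what is proved, stated in full; the proofs are below) =====
def Claim_equal_apply_v5_rerank_to_candidates_py : Prop := ∀ (ranked_indices : List Int) (candidate_paths : List (List Int)) (path_to_doc_id : List (List Int × String)) (topk : Int), Dom_apply_v5_rerank_to_candidates_py ranked_indices candidate_paths path_to_doc_id topk → Spec_apply_v5_rerank_to_candidates_py ranked_indices candidate_paths path_to_doc_id topk (apply_v5_rerank_to_candidates_py ranked_indices candidate_paths path_to_doc_id topk)

-- ===== LEMMAS AND PROOFS =====

-- proof-side: the in-range ranked picks (first-loop candidate stream)
def pvBOrdered (cps : List (List Int)) (ranked : List Int) : List (List Int) :=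
  ranked.filterMap (fun r =>
    let pos := r - 1
    if 0 ≤ pos ∧ pos < (cps.length : Int) then some ((PySem.List.pyGet? cps pos).getD []) else none)

-- proof-side: the generic select-dedup-break pass both of A's loops instantiate
def pvPass (d : List (List Int × String)) (k : Int) :
    List (List Int) → List (List Int) × List String × PySem.Set (List Int) →
    List (List Int) × List String × PySem.Set (List Int)
  | [], s => s
  | p :: rest, (sel, ids, seen) =>
    if PySem.Set.contains seen p then pvPass d k rest (sel, ids, seen)
    else
      let seen' := PySem.Set.add seen p
      let sel' := sel ++ [p]
      let ids' := ids ++ [pvDocId d p]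
      if (sel'.length : Int) ≥ k then (sel', ids', seen')
      else pvPass d k rest (sel', ids', seen')

-- proof-side: ordered first occurrences not yet seen
def pvUniq (seen : List (List Int)) : List (List Int) → List (List Int)
  | [] => []
  | x :: xs => if x ∈ seen then pvUniq seen xs else x :: pvUniq (seen ++ [x]) xs

def pvAfter (seen : List (List Int)) : List (List Int) → List (List Int)
  | [] => seen
  | x :: xs => if x ∈ seen then pvAfter seen xs else pvAfter (seen ++ [x]) xs

-- proof-side: first pair per key, in order
def pvFirsts (seen : List (List Int)) : List (List Int × Int) → List (List Int × Int)
  | [] => []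
  | p :: ps => if p.1 ∈ seen then pvFirsts seen ps else p :: pvFirsts (seen ++ [p.1]) ps

lemma pvALoop2_eq_pass (d : List (List Int × String)) (k : Int) :
    ∀ (xs : List (List Int)) (sel : List (List Int)) (ids : List String) (seen : PySem.Set (List Int)),
    pvALoop2 d k xs (sel, ids, seen) = pvPass d k xs (sel, ids, seen) := by
  intro xs
  induction xs with
  | nil => intro sel ids seen; rfl
  | cons p rest ih =>
    intro sel ids seen
    simp only [pvALoop2, pvPass, pvDocId]
    split_ifs <;> simp [ih]

lemma pvALoop1_eq_pass (cps : List (List Int)) (d : List (List Int × String)) (k : Int) :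
    ∀ (rs : List Int) (sel : List (List Int)) (ids : List String) (seen : PySem.Set (List Int)),
    pvALoop1 cps d k rs (sel, ids, seen) = pvPass d k (pvBOrdered cps rs) (sel, ids, seen) := by
  intro rs
  induction rs with
  | nil => intro sel ids seen; rfl
  | cons r rest ih =>
    intro sel ids seen
    by_cases hg : r - 1 < 0 ∨ (cps.length : Int) ≤ r - 1
    · have hout : ¬ (0 ≤ r - 1 ∧ r - 1 < (cps.length : Int)) := by omega
      simp only [pvALoop1, pvBOrdered, List.filterMap_cons, if_pos hg, if_neg hout]
      exact ih sel ids seen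
    · have hin : 0 ≤ r - 1 ∧ r - 1 < (cps.length : Int) := by omega
      simp only [pvALoop1, pvBOrdered, List.filterMap_cons, if_neg hg, if_pos hin, pvPass]
      by_cases hs : PySem.Set.contains seen ((PySem.List.pyGet? cps (r - 1)).getD []) = true
      · simp only [if_pos hs]; exact ih sel ids seen
      · simp only [if_neg hs]
        by_cases hk2 : ((sel ++ [(PySem.List.pyGet? cps (r - 1)).getD []]).length : Int) ≥ k
        · simp only [if_pos hk2]
        · simp only [if_neg hk2]; exact ih _ _ _

-- invariant: lengths of paths/ids agree and never exceed k (starting below k)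
lemma pvPass_inv (d : List (List Int × String)) (k : Int) :
    ∀ (xs : List (List Int)) (sel : List (List Int)) (ids : List String) (seen : PySem.Set (List Int)),
    sel.length = ids.length → (sel.length : Int) < k →
    (pvPass d k xs (sel, ids, seen)).1.length = (pvPass d k xs (sel, ids, seen)).2.1.length ∧
    ((pvPass d k xs (sel, ids, seen)).1.length : Int) ≤ k := by
  intro xs
  induction xs with
  | nil => intro sel ids seen h1 h2; simpa [pvPass] using ⟨h1, by omega⟩
  | cons p rest ih =>
    intro sel ids seen h1 h2
    simp only [pvPass]
    split_ifs with hs hk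
    · exact ih sel ids seen h1 h2
    · simp; omega
    · exact ih _ _ _ (by simp [h1]) (by simp at hk ⊢; omega)

-- once full, the pass appends at most one more element, cut off by the final take
lemma pvPass_full (d : List (List Int × String)) (k : Int) :
    ∀ (ys : List (List Int)) (sel : List (List Int)) (ids : List String) (seen : PySem.Set (List Int)),
    sel.length = ids.length → (sel.length : Int) ≥ k →
    (pvPass d k ys (sel, ids, seen)).1.take sel.length = sel ∧
    (pvPass d k ys (sel, ids, seen)).2.1.take sel.length = ids := by
  intro ys
  induction ys with
  | nil => intro sel ids seen h1 h2; simp [pvPass, h1]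
  | cons p rest ih =>
    intro sel ids seen h1 h2
    simp only [pvPass]
    split_ifs with hs hk
    · exact ih sel ids seen h1 h2
    · constructor
      · exact List.take_left (l₁ := sel) (l₂ := [p])
      · rw [h1]; exact List.take_left (l₁ := ids) (l₂ := [pvDocId d p])
    · exfalso; simp at hk; omega

-- characterisation of the pass by pvUniq, up to the final take
lemma pvPass_char (d : List (List Int × String)) (k : Int) :
    ∀ (xs : List (List Int)) (sel : List (List Int)) (ids : List String) (seen : PySem.Set (List Int)),
    sel.length = ids.length → (sel.length : Int) < k →
    (pvPass d k xs (sel, ids, seen)).1.take k.toNat = (sel ++ pvUniq seen xs).take k.toNat ∧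
    (pvPass d k xs (sel, ids, seen)).2.1.take k.toNat = (ids ++ (pvUniq seen xs).map (pvDocId d)).take k.toNat ∧
    (((pvPass d k xs (sel, ids, seen)).1.length : Int) < k →
      pvPass d k xs (sel, ids, seen) = (sel ++ pvUniq seen xs, ids ++ (pvUniq seen xs).map (pvDocId d), pvAfter seen xs)) := by
  intro xs
  induction xs with
  | nil => intro sel ids seen h1 h2; simp [pvPass, pvUniq, pvAfter]
  | cons p rest ih =>
    intro sel ids seen h1 h2
    by_cases hs : PySem.Set.contains seen p = true
    · have hmem : p ∈ seen := (PySem.Set.contains_iff seen p).mp hs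
      simp only [pvPass, if_pos hs, pvUniq, pvAfter, if_pos hmem]
      exact ih sel ids seen h1 h2
    · have hmem : p ∉ seen := fun h => hs ((PySem.Set.contains_iff seen p).mpr h)
      have hadd : PySem.Set.add seen p = seen ++ [p] := PySem.Set.add_of_not_mem hmem
      simp only [pvPass, if_neg hs, pvUniq, pvAfter, if_neg hmem, hadd]
      by_cases hk2 : ((sel ++ [p]).length : Int) ≥ k
      · have hklen : k.toNat = (sel ++ [p]).length := by simp at hk2 ⊢; omega
        simp only [if_pos hk2, hklen]
        refine ⟨?_, ?_, ?_⟩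
        · rw [List.take_length, show sel ++ p :: pvUniq (seen ++ [p]) rest = (sel ++ [p]) ++ pvUniq (seen ++ [p]) rest by simp,
              List.take_left]
        · have : (ids ++ [pvDocId d p]).length = (sel ++ [p]).length := by simp [h1]
          rw [← this, List.take_length, List.map_cons,
              show ids ++ pvDocId d p :: (pvUniq (seen ++ [p]) rest).map (pvDocId d) = (ids ++ [pvDocId d p]) ++ (pvUniq (seen ++ [p]) rest).map (pvDocId d) by simp,
              List.take_left]
        · intro h; omega
      · simp only [if_neg hk2]
        obtain ⟨c1, c2, c3⟩ := ih (sel ++ [p]) (ids ++ [pvDocId d p]) (seen ++ [p]) (by simp [h1]) (by simp at hk2 ⊢; omega)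
        refine ⟨?_, ?_, ?_⟩
        · rw [c1]; simp
        · rw [c2]; simp
        · intro h; rw [c3 h]; simp

lemma pvUniq_append : ∀ (xs seen ys : List (List Int)),
    pvUniq seen (xs ++ ys) = pvUniq seen xs ++ pvUniq (pvAfter seen xs) ys := by
  intro xs
  induction xs with
  | nil => intro seen ys; simp [pvUniq, pvAfter]
  | cons x rest ih =>
    intro seen ys
    simp only [List.cons_append, pvUniq, pvAfter]
    by_cases h : x ∈ seen
    · simp only [if_pos h]; exact ih seen ys
    · simp only [if_neg h, List.cons_append, List.cons.injEq, true_and]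
      exact ih (seen ++ [x]) ys

lemma pvUniq_nodup : ∀ (xs seen : List (List Int)),
    (pvUniq seen xs).Nodup ∧ ∀ x ∈ pvUniq seen xs, x ∉ seen := by
  intro xs
  induction xs with
  | nil => intro seen; simp [pvUniq]
  | cons x rest ih =>
    intro seen
    simp only [pvUniq]
    by_cases h : x ∈ seen
    · simp only [if_pos h]; exact ih seen
    · simp only [if_neg h]
      obtain ⟨hn, hm⟩ := ih (seen ++ [x])
      refine ⟨List.nodup_cons.mpr ⟨fun hx => (hm x hx) (by simp), hn⟩, ?_⟩
      intro y hy
      rcases List.mem_cons.mp hy with rfl | hy'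
      · exact h
      · exact fun hys => (hm y hy') (by simp [hys])


-- the pair stream B's two setdefault folds traverse: (path, priority), ranked picks then backfill
def pvPairs (cps : List (List Int)) (ranked : List Int) : List (List Int × Int) :=
  (PySem.List.enumerate ranked).filterMap (fun p =>
    if 0 ≤ p.2 - 1 ∧ p.2 - 1 < (cps.length : Int)
    then some (((PySem.List.pyGet? cps (p.2 - 1)).getD [], p.1)) else none)
  ++ (PySem.List.enumerate cps).map (fun p => (p.2, ((ranked.length : Int) + p.1)))

lemma pvFold1_eq (cps : List (List Int)) :
    ∀ (xs : List (Int × Int)) (dct : PySem.Dict (List Int) Int),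
    xs.foldl (fun dct p =>
        let pos := p.2 - 1
        if 0 ≤ pos ∧ pos < (cps.length : Int)
        then dct.setdefault ((PySem.List.pyGet? cps pos).getD []) p.1
        else dct) dct
    = (xs.filterMap (fun p =>
        if 0 ≤ p.2 - 1 ∧ p.2 - 1 < (cps.length : Int)
        then some (((PySem.List.pyGet? cps (p.2 - 1)).getD [], p.1)) else none)).foldl
        (fun dct q => dct.setdefault q.1 q.2) dct := by
  intro xs
  induction xs with
  | nil => intro dct; rfl
  | cons p rest ih =>
    intro dct
    simp only [List.foldl_cons, List.filterMap_cons]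
    split_ifs with h
    · simp only [List.foldl_cons]; exact ih _
    · exact ih _

lemma pvFold2_eq (n : Int) :
    ∀ (xs : List (Int × List Int)) (dct : PySem.Dict (List Int) Int),
    xs.foldl (fun dct p => dct.setdefault p.2 (n + p.1)) dct
    = (xs.map (fun p => (p.2, n + p.1))).foldl (fun dct q => dct.setdefault q.1 q.2) dct := by
  intro xs
  induction xs with
  | nil => intro dct; rfl
  | cons p rest ih => intro dct; simp only [List.foldl_cons, List.map_cons]; exact ih _

lemma pvPairs_map_fst_left (cps : List (List Int)) :
    ∀ (ranked : List Int) (s : Int),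
    ((PySem.List.enumerate ranked s).filterMap (fun p =>
      if 0 ≤ p.2 - 1 ∧ p.2 - 1 < (cps.length : Int)
      then some (((PySem.List.pyGet? cps (p.2 - 1)).getD [], p.1)) else none)).map (·.1)
    = pvBOrdered cps ranked := by
  intro ranked
  induction ranked with
  | nil => intro s; rfl
  | cons r rest ih =>
    intro s
    simp only [PySem.List.enumerate_cons, List.filterMap_cons, pvBOrdered]
    split_ifs with h
    · simp only [List.map_cons]
      exact congrArg _ (ih (s + 1))
    · exact ih (s + 1)

lemma pvPairs_map_fst (cps : List (List Int)) (ranked : List Int) :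
    (pvPairs cps ranked).map (·.1) = pvBOrdered cps ranked ++ cps := by
  simp only [pvPairs, List.map_append, pvPairs_map_fst_left, List.map_map]
  congr 1
  have : ((fun p : List Int × Int => p.1) ∘ fun p : Int × List Int => (p.2, (ranked.length : Int) + p.1))
       = (fun p : Int × List Int => p.2) := rfl
  rw [this, PySem.List.map_snd_enumerate]

-- priorities along pvPairs are strictly increasing
lemma pvPairs_left_facts (cps : List (List Int)) :
    ∀ (ranked : List Int) (s : Int),
    (∀ q ∈ (PySem.List.enumerate ranked s).filterMap (fun p =>
        if 0 ≤ p.2 - 1 ∧ p.2 - 1 < (cps.length : Int)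
        then some (((PySem.List.pyGet? cps (p.2 - 1)).getD [], p.1)) else none),
      s ≤ q.2 ∧ q.2 < s + ranked.length) ∧
    ((PySem.List.enumerate ranked s).filterMap (fun p =>
        if 0 ≤ p.2 - 1 ∧ p.2 - 1 < (cps.length : Int)
        then some (((PySem.List.pyGet? cps (p.2 - 1)).getD [], p.1)) else none)).Pairwise
      (fun a b => a.2 < b.2) := by
  intro ranked
  induction ranked with
  | nil => intro s; simp [PySem.List.enumerate]
  | cons r rest ih =>
    intro s
    obtain ⟨ihb, ihp⟩ := ih (s + 1)
    simp only [PySem.List.enumerate_cons, List.filterMap_cons, List.length_cons]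
    split_ifs with h
    · refine ⟨?_, ?_⟩
      · intro q hq
        rcases List.mem_cons.mp hq with rfl | hq'
        · refine ⟨le_rfl, ?_⟩
          push_cast
          omega
        · have := ihb q hq'
          push_cast at this ⊢
          omega
      · refine List.pairwise_cons.mpr ⟨fun q hq => ?_, ihp⟩
        have := (ihb q hq).1
        show s < q.2
        omega
    · refine ⟨fun q hq => ?_, ihp⟩
      have := ihb q hq
      push_cast at this ⊢
      omega

lemma pvPairs_pairwise (cps : List (List Int)) (ranked : List Int) :
    (pvPairs cps ranked).Pairwise (fun a b => a.2 < b.2) := by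
  obtain ⟨hb, hp⟩ := pvPairs_left_facts cps ranked 0
  rw [pvPairs, List.pairwise_append]
  refine ⟨hp, ?_, ?_⟩
  · rw [List.pairwise_map]
    exact (PySem.List.pairwise_lt_enumerate cps 0).imp (by intro a b hab; simpa using hab)
  · intro a ha b hb2
    have ha2 := (hb a ha).2
    rcases List.mem_map.mp hb2 with ⟨p, hp2, rfl⟩
    rcases (PySem.List.mem_enumerate_iff _ _ _).mp hp2 with ⟨j, hj, rfl⟩
    simp at ha2 ⊢
    omega

-- a setdefault fold appends exactly the first pair per new key
lemma pvItems_foldl_setdefault :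
    ∀ (ps : List (List Int × Int)) (dct : PySem.Dict (List Int) Int) (seen : List (List Int)),
    (∀ x, dct.contains x = true ↔ x ∈ seen) →
    (ps.foldl (fun d p => d.setdefault p.1 p.2) dct).items = dct.items ++ pvFirsts seen ps := by
  intro ps
  induction ps with
  | nil => intro dct seen h; simp [pvFirsts]
  | cons p rest ih =>
    intro dct seen h
    simp only [List.foldl_cons, pvFirsts]
    by_cases hc : p.1 ∈ seen
    · rw [if_pos hc, PySem.Dict.setdefault_of_contains dct p.2 ((h p.1).mpr hc)]
      exact ih dct seen h
    · have hcf : dct.contains p.1 = false := by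
        cases hcc : dct.contains p.1
        · rfl
        · exact absurd ((h p.1).mp hcc) hc
      rw [if_neg hc, PySem.Dict.setdefault_of_not_contains dct p.2 hcf,
          ih (dct.insert p.1 p.2) (seen ++ [p.1]) (by
            intro x
            rw [PySem.Dict.contains_insert dct p.1 x p.2]
            simp only [Bool.or_eq_true, beq_iff_eq, List.mem_append, List.mem_singleton, h x]
            tauto),
          PySem.Dict.items_insert_of_not_contains dct p.2 hcf]
      simp

lemma pvFirsts_map_fst : ∀ (ps : List (List Int × Int)) (seen : List (List Int)),
    (pvFirsts seen ps).map (·.1) = pvUniq seen (ps.map (·.1)) := by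
  intro ps
  induction ps with
  | nil => intro seen; rfl
  | cons p rest ih =>
    intro seen
    simp only [pvFirsts, List.map_cons, pvUniq]
    split_ifs with h
    · exact ih seen
    · simp only [List.map_cons]; exact congrArg _ (ih (seen ++ [p.1]))

lemma pvFirsts_sublist : ∀ (ps : List (List Int × Int)) (seen : List (List Int)),
    List.Sublist (pvFirsts seen ps) ps := by
  intro ps
  induction ps with
  | nil => intro seen; simp [pvFirsts]
  | cons p rest ih =>
    intro seen
    simp only [pvFirsts]
    split_ifs with h
    · exact (ih seen).cons p
    · exact (ih (seen ++ [p.1])).cons₂ p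

lemma pvPairwise_imp_of_mem {α : Type} (l : List α) (R S : α → α → Prop) (h : l.Pairwise R)
    (himp : ∀ a ∈ l, ∀ b ∈ l, R a b → S a b) : l.Pairwise S := by
  induction l with
  | nil => exact List.Pairwise.nil
  | cons x xs ih =>
    rw [List.pairwise_cons] at h ⊢
    exact ⟨fun b hb => himp x (by simp) b (by simp [hb]) (h.1 b hb),
           ih h.2 (fun a ha b hb => himp a (by simp [ha]) b (by simp [hb]))⟩


lemma pvAlt_eq (ranked : List Int) (cps : List (List Int)) (d : List (List Int × String)) (topk : Int) :
    apply_v5_rerank_to_candidates_py_alt ranked cps d topk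
    = ((pvUniq [] (pvBOrdered cps ranked ++ cps)).take (max 1 topk).toNat,
       ((pvUniq [] (pvBOrdered cps ranked ++ cps)).take (max 1 topk).toNat).map (pvDocId d)) := by
  unfold apply_v5_rerank_to_candidates_py_alt
  simp only [pvFold1_eq, pvFold2_eq, PySem.List.len_eq]
  rw [show ((PySem.List.enumerate cps).map (fun p => (p.2, (ranked.length : Int) + p.1))).foldl
        (fun dct q => dct.setdefault q.1 q.2)
        (((PySem.List.enumerate ranked).filterMap (fun p =>
            if 0 ≤ p.2 - 1 ∧ p.2 - 1 < (cps.length : Int)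
            then some (((PySem.List.pyGet? cps (p.2 - 1)).getD [], p.1)) else none)).foldl
          (fun dct q => dct.setdefault q.1 q.2) PySem.Dict.empty)
      = (pvPairs cps ranked).foldl (fun dct q => dct.setdefault q.1 q.2) PySem.Dict.empty
      from (List.foldl_append ..).symm]
  set prio := (pvPairs cps ranked).foldl (fun dct q => dct.setdefault q.1 q.2) PySem.Dict.empty with hprio
  have hitems : prio.items = pvFirsts [] (pvPairs cps ranked) := by
    rw [hprio, pvItems_foldl_setdefault (pvPairs cps ranked) PySem.Dict.empty [] (by simp)]
    rfl
  have hkeys : prio.keys = pvUniq [] (pvBOrdered cps ranked ++ cps) := by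
    show prio.items.map (·.1) = _
    rw [hitems, pvFirsts_map_fst, pvPairs_map_fst]
  have hnodup : prio.keys.Nodup := by rw [hkeys]; exact (pvUniq_nodup _ []).1
  have hpi : prio.items.Pairwise (fun a b => a.2 < b.2) := by
    rw [hitems]; exact (pvPairs_pairwise cps ranked).sublist (pvFirsts_sublist _ [])
  have hsorted : PySem.List.sorted prio.keys (fun t => prio.getD t 0) false = prio.keys := by
    apply PySem.List.sorted_eq_self_of_pairwise
    show (prio.items.map (·.1)).Pairwise _
    rw [List.pairwise_map]
    refine pvPairwise_imp_of_mem _ _ _ hpi (fun a ha b hb hab => ?_)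
    rw [PySem.Dict.getD_of_mem_items prio (show (a.1, a.2) ∈ prio.items by simpa using ha) hnodup 0,
        PySem.Dict.getD_of_mem_items prio (show (b.1, b.2) ∈ prio.items by simpa using hb) hnodup 0]
    omega
  rw [hsorted, hkeys, PySem.List.slice_to _ (by omega : (0:Int) ≤ max 1 topk)]

lemma pvA_eq (ranked : List Int) (cps : List (List Int)) (d : List (List Int × String)) (topk : Int) :
    apply_v5_rerank_to_candidates_py ranked cps d topk
    = ((pvUniq [] (pvBOrdered cps ranked ++ cps)).take (max 1 topk).toNat,
       ((pvUniq [] (pvBOrdered cps ranked ++ cps)).map (pvDocId d)).take (max 1 topk).toNat) := by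
  simp only [apply_v5_rerank_to_candidates_py]
  set k := max 1 topk with hkdef
  have hk1 : (1 : Int) ≤ k := le_max_left 1 topk
  have hemp : (PySem.Set.empty : PySem.Set (List Int)) = [] := rfl
  rw [pvALoop1_eq_pass, hemp]
  rcases hr1 : pvPass d k (pvBOrdered cps ranked) ([], [], []) with ⟨s1, i1, sn1⟩
  have hinv1 := pvPass_inv d k (pvBOrdered cps ranked) [] [] [] rfl (by simp; omega)
  rw [hr1] at hinv1
  obtain ⟨hlen1, hle1⟩ := hinv1
  simp only at hlen1 hle1
  have hchar1 := pvPass_char d k (pvBOrdered cps ranked) [] [] [] rfl (by simp; omega)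
  rw [hr1] at hchar1
  obtain ⟨c1, c2, c3⟩ := hchar1
  simp only [List.nil_append] at c1 c2 c3
  rw [pvALoop2_eq_pass]
  rw [pvUniq_append]
  by_cases hfull : ((s1.length : Int)) ≥ k
  · have hkn : k.toNat = s1.length := by omega
    rcases hr2 : pvPass d k cps (s1, i1, sn1) with ⟨s2, i2, sn2⟩
    have hf := pvPass_full d k cps s1 i1 sn1 hlen1 hfull
    rw [hr2] at hf
    simp only at hf
    have hs1 : s1 = (pvUniq [] (pvBOrdered cps ranked)).take k.toNat := by
      rw [← c1, hkn, List.take_length]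
    have hlenU : k.toNat ≤ (pvUniq [] (pvBOrdered cps ranked)).length := by
      by_contra hlt
      push Not at hlt
      have := congrArg List.length hs1
      rw [List.length_take] at this
      omega
    have hi1 : i1 = ((pvUniq [] (pvBOrdered cps ranked)).map (pvDocId d)).take k.toNat := by
      rw [← c2, hkn, hlen1, List.take_length]
    rw [PySem.List.slice_to _ (by omega), PySem.List.slice_to _ (by omega)]
    simp only [hkn, Prod.mk.injEq]
    rw [hf.1, hf.2, List.map_append]
    constructor
    · rw [List.take_append_of_le_length (hkn ▸ hlenU), ← hkn, ← hs1]
    · rw [List.take_append_of_le_length (by simpa using (hkn ▸ hlenU)), ← hkn, ← hi1]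
  · have h3 := c3 (by omega)
    obtain ⟨hs1, hi1, hsn1⟩ : s1 = pvUniq [] (pvBOrdered cps ranked) ∧
        i1 = (pvUniq [] (pvBOrdered cps ranked)).map (pvDocId d) ∧
        sn1 = pvAfter [] (pvBOrdered cps ranked) := by
      simpa [Prod.ext_iff] using h3
    rcases hr2 : pvPass d k cps (s1, i1, sn1) with ⟨s2, i2, sn2⟩
    have hchar2 := pvPass_char d k cps s1 i1 sn1 hlen1 (by omega)
    rw [hr2] at hchar2
    obtain ⟨d1, d2, _⟩ := hchar2
    simp only at d1 d2
    rw [PySem.List.slice_to _ (by omega), PySem.List.slice_to _ (by omega)]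
    simp only [Prod.mk.injEq]
    constructor
    · rw [d1, hs1, hsn1]
    · rw [d2, hi1, hsn1, List.map_append]

-- ===== VERDICT (by name: the statement is the Claim_ definition above) =====
theorem apply_v5_rerank_to_candidates_py_spec : Claim_equal_apply_v5_rerank_to_candidates_py := by
  intro ranked cps d topk _
  unfold Spec_apply_v5_rerank_to_candidates_py
  rw [pvA_eq, pvAlt_eq, List.map_take]
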